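-- pv_equiv track=rewrite | github.com/Oo1Insane1oO/VMC | source/scripts/makeinputsHO.py | createMagic
-- ===== SOURCE A (Python) =====
-- def degeneracy(i, dim):
--     if (dim == 2):
--         return 2*(i+1)
--     else:
--         return (i+1)*(i+2)
--
-- def createMagic(numParticlesMax, dim):
--     """ return list of magic number below incluse numParticlesMax """
--     magic = [2]
--     n = magic[0]
--     while (n < numParticlesMax):
--         magic.append(degeneracy(len(magic), dim))
--         n += magic[-1]
--     # end while
--     for i in range(1,len(magic)):
--         magic[i] += magic[i-1]
--     # end fori
--     return magic
-- ===== SOURCE B (Python) =====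
-- def degeneracy(i, dim):
--     if (dim == 2):
--         return 2*(i+1)
--     else:
--         return (i+1)*(i+2)
--
-- def createMagic(numParticlesMax, dim):
--     """ return list of magic number below incluse numParticlesMax """
--     cum = [2]
--     total = 2
--     while total < numParticlesMax:
--         total += degeneracy(len(cum), dim)
--         cum.append(total)
--     return cum
-- ===== Notes on version B (the rewrite author's own statement) =====
-- stated objective: simpler
-- what changed: B maintains the running cumulative total directly in a single loop, appending each cumulative magic number as it goes, instead of A's two-phase build of a raw degeneracy list followed by an in-place prefix-sum pass.
import Mathlib
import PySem

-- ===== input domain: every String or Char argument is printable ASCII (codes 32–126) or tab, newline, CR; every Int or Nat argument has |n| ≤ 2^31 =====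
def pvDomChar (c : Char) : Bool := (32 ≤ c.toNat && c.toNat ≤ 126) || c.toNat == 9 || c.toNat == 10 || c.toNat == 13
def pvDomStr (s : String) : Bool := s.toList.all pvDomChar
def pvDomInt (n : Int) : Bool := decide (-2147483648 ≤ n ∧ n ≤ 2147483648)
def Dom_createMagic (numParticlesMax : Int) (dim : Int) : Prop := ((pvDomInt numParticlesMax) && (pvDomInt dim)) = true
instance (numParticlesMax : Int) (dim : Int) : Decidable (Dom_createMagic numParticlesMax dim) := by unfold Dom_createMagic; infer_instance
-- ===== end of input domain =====

-- B replaces A's two-phase (raw degeneracy list, then in-place prefix-sum pass) by one loop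
-- maintaining the running cumulative total; objective: simpler (same return value, A also only
-- mutates its own local list).

-- ===== PORT A =====
def degeneracyA (i : Int) (dim : Int) : Int :=
  if dim = 2 then 2*(i+1) else (i+1)*(i+2)

theorem degeneracyA_ge (i dim : Int) (h : 0 ≤ i) : 2 ≤ degeneracyA i dim := by
  unfold degeneracyA; split_ifs
  · omega
  · nlinarith

-- the while-loop of A: append raw degeneracies, summing into n
def loopA (npm dim : Int) (magic : List Int) (n : Int) : List Int :=
  if n < npm then
    loopA npm dim (magic ++ [degeneracyA (magic.length : Int) dim])
      (n + degeneracyA (magic.length : Int) dim)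
  else magic
termination_by (npm - n).toNat
decreasing_by
  have := degeneracyA_ge (magic.length : Int) dim (by positivity)
  omega

-- body of A's prefix-sum for-loop: magic[i] += magic[i-1]
def prefixStep (m : List Int) (i : Int) : List Int :=
  PySem.List.pySetD m i (PySem.List.pyGetD m i 0 + PySem.List.pyGetD m (i - 1) 0)

def createMagic (numParticlesMax : Int) (dim : Int) : List Int :=
  let magic := loopA numParticlesMax dim [2] 2
  (PySem.List.pyRange 1 (magic.length : Int) 1).foldl prefixStep magic

-- ===== PORT B =====
-- the while-loop of B: append cumulative totals directly
def loopB (npm dim : Int) (cum : List Int) (total : Int) : List Int :=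
  if total < npm then
    loopB npm dim (cum ++ [total + degeneracyA (cum.length : Int) dim])
      (total + degeneracyA (cum.length : Int) dim)
  else cum
termination_by (npm - total).toNat
decreasing_by
  have := degeneracyA_ge (cum.length : Int) dim (by positivity)
  omega

def createMagic_alt (numParticlesMax : Int) (dim : Int) : List Int :=
  loopB numParticlesMax dim [2] 2

-- ===== PRECONDITION & SPEC =====
def Spec_createMagic (numParticlesMax : Int) (dim : Int) (out : List Int) : Prop := out = createMagic_alt numParticlesMax dim
instance (numParticlesMax : Int) (dim : Int) (out : List Int) : Decidable (Spec_createMagic numParticlesMax dim out) := by unfold Spec_createMagic; infer_instance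

-- ===== CLAIM (what is proved, stated in full; the proofs are below) =====
def Claim_equal_createMagic : Prop := ∀ (numParticlesMax : Int) (dim : Int), Dom_createMagic numParticlesMax dim → Spec_createMagic numParticlesMax dim (createMagic numParticlesMax dim)

-- ===== LEMMAS AND PROOFS =====

-- prefix sums of a list
def psum : List Int → List Int
  | [] => []
  | a :: l => a :: (psum l).map (a + ·)

theorem psum_length (l : List Int) : (psum l).length = l.length := by
  induction l with
  | nil => rfl
  | cons a l ih => simp [psum, ih]

theorem psum_concat (ys : List Int) (a : Int) :
    psum (ys ++ [a]) = psum ys ++ [ys.sum + a] := by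
  induction ys with
  | nil => simp [psum]
  | cons y ys ih =>
      simp only [List.cons_append, psum, ih, List.map_append, List.map_cons, List.map_nil,
        List.sum_cons]
      simp [add_assoc]

-- the two while-loops correspond: cum = psum magic, total = magic.sum
theorem loop_eq (k : Nat) : ∀ (npm dim : Int) (magic : List Int),
    (npm - magic.sum).toNat ≤ k →
    psum (loopA npm dim magic magic.sum) = loopB npm dim (psum magic) magic.sum := by
  induction k with
  | zero =>
      intro npm dim magic hk
      rw [loopA, loopB]
      have : ¬ magic.sum < npm := by omega
      simp [this]
  | succ k ih =>
      intro npm dim magic hk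
      rw [loopA, loopB]
      by_cases h : magic.sum < npm
      · simp only [h, if_pos, psum_length]
        have hd := degeneracyA_ge (magic.length : Int) dim (by positivity)
        have hsum : (magic ++ [degeneracyA (magic.length : Int) dim]).sum
            = magic.sum + degeneracyA (magic.length : Int) dim := by simp
        have := ih npm dim (magic ++ [degeneracyA (magic.length : Int) dim]) (by omega)
        rw [hsum] at this
        rw [this, psum_concat]
      · simp [h]

-- A's for-loop invariant: after indices 1..k, the list is psum of the first k elements
theorem prefix_inv (magic : List Int) : ∀ (k : Nat), 1 ≤ k → k ≤ magic.length →
    (PySem.List.pyRange 1 (k : Int) 1).foldl prefixStep magic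
      = psum (magic.take k) ++ magic.drop k := by
  intro k
  induction k with
  | zero => omega
  | succ k ih =>
      intro _ hk
      by_cases h1 : k = 0
      · subst h1
        rw [PySem.List.pyRange_one_eq_nil (by norm_num)]
        match magic, hk with
        | a :: l, _ => simp [psum]
      · have hk1 : 1 ≤ k := by omega
        have hklt : k < magic.length := by omega
        have hrange : PySem.List.pyRange 1 ((k : Int) + 1) 1
            = PySem.List.pyRange 1 (k : Int) 1 ++ [(k : Int)] :=
          PySem.List.pyRange_one_succ_right (by omega)
        push_cast
        rw [hrange, List.foldl_append]
        rw [ih hk1 (by omega)]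
        -- one step: prefixStep at index k
        have hlenp : (psum (magic.take k)).length = k := by
          rw [psum_length, List.length_take_of_le (by omega)]
        have hdrop : magic.drop k = magic[k] :: magic.drop (k + 1) :=
          List.drop_eq_getElem_cons hklt
        have htake : magic.take (k + 1) = magic.take k ++ [magic[k]] := by
          rw [List.take_add_one]
          simp [List.getElem?_eq_getElem hklt]
        simp only [List.foldl_cons, List.foldl_nil, prefixStep]
        rw [hdrop]
        have hget1 : PySem.List.pyGetD (psum (magic.take k) ++ magic[k] :: magic.drop (k + 1)) (k : Int) 0 = magic[k] := by
          rw [PySem.List.pyGetD_natCast]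
          rw [List.getD_eq_getElem?_getD, List.getElem?_append_right (by omega)]
          simp [hlenp, List.getElem?_eq_getElem hklt]
        have hget2 : PySem.List.pyGetD (psum (magic.take k) ++ magic[k] :: magic.drop (k + 1)) ((k : Int) - 1) 0 = (magic.take k).sum := by
          have : ((k : Int) - 1) = ((k - 1 : Nat) : Int) := by omega
          rw [this, PySem.List.pyGetD_natCast]
          rw [List.getD_eq_getElem?_getD, List.getElem?_append_left (by omega)]
          -- last element of psum (take k magic) is (take k magic).sum
          obtain ⟨ys, a, hya⟩ : ∃ ys a, magic.take k = ys ++ [a] := by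
            have hne : magic.take k ≠ [] := by
              intro hnil
              have := congrArg List.length hnil
              rw [List.length_take_of_le (le_of_lt hklt), List.length_nil] at this
              omega
            exact ⟨(magic.take k).dropLast, (magic.take k).getLast hne, (List.dropLast_append_getLast hne).symm⟩
          have hys : ys.length = k - 1 := by
            have := congrArg List.length hya
            rw [List.length_take_of_le (le_of_lt hklt)] at this
            simp at this
            omega
          rw [hya, psum_concat]
          rw [List.getElem?_append_right (by rw [psum_length, hys])]
          simp [psum_length, hys]
        rw [hget1, hget2]
        have hset : PySem.List.pySetD (psum (magic.take k) ++ magic[k] :: magic.drop (k + 1)) (k : Int) (magic[k] + (magic.take k).sum)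
            = psum (magic.take k) ++ (magic[k] + (magic.take k).sum) :: magic.drop (k + 1) := by
          rw [PySem.List.pySetD_natCast, List.set_append_right _ _ (by omega)]
          rw [show k - (psum (magic.take k)).length = 0 from by omega, List.set_cons_zero]
        rw [hset, htake, psum_concat]
        simp
        ring_nf

theorem prefix_loop (magic : List Int) :
    (PySem.List.pyRange 1 (magic.length : Int) 1).foldl prefixStep magic = psum magic := by
  by_cases h : magic.length = 0
  · match magic, h with
    | [], _ => simp [psum, PySem.List.pyRange_one_eq_nil]
  · have := prefix_inv magic magic.length (by omega) le_rfl
    simpa using this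

theorem loopA_length_pres (npm dim : Int) (magic : List Int) (n : Int) :
    magic.length ≤ (loopA npm dim magic n).length := by
  rw [loopA]
  split_ifs with h
  · have := loopA_length_pres npm dim (magic ++ [degeneracyA (magic.length : Int) dim]) (n + degeneracyA (magic.length : Int) dim)
    simp at this
    omega
  · exact le_refl _
termination_by (npm - n).toNat
decreasing_by
  have := degeneracyA_ge (magic.length : Int) dim (by positivity)
  omega

-- ===== VERDICT (by name: the statement is the Claim_ definition above) =====
theorem createMagic_spec : Claim_equal_createMagic := by
  intro npm dim _
  unfold Spec_createMagic createMagic createMagic_alt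
  simp only
  rw [prefix_loop]
  have h2 : (2 : Int) = ([2] : List Int).sum := by simp
  calc psum (loopA npm dim [2] 2)
      = loopB npm dim (psum [2]) ([2] : List Int).sum := by
        rw [h2]; exact loop_eq (npm - ([2] : List Int).sum).toNat npm dim [2] le_rfl
    _ = loopB npm dim [2] 2 := by simp [psum]
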